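-- pv_equiv track=rewrite | github.com/pipalacademy/engage | engage/engage/doctype/problem_repository/problem_repository.py | is_github_repo_name_valid
-- ===== SOURCE A (Python) =====
-- import string
--
-- def is_github_repo_name_valid(val):
--     max_length = 100
--     allowed_chars = string.ascii_letters + string.digits + "-_."
--
--     if len(val) > max_length:
--         return False
--
--     for char in val:
--         if char not in allowed_chars:
--             return False
--
--     return True
-- ===== SOURCE B (Python) =====
-- import re
--
-- _REPO_NAME_RE = re.compile(r'[A-Za-z0-9_.\-]{0,100}\Z')
--
-- def is_github_repo_name_valid(val):
--     return bool(_REPO_NAME_RE.fullmatch(val))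
-- ===== Notes on version B (the rewrite author's own statement) =====
-- stated objective: idiomatic
-- what changed: Replaced the explicit length guard and per-character membership loop over a concatenated allowed-characters string with a single precompiled anchored regex fullmatch whose character class and {0,100} quantifier do both checks in one engine pass.
import Mathlib
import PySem

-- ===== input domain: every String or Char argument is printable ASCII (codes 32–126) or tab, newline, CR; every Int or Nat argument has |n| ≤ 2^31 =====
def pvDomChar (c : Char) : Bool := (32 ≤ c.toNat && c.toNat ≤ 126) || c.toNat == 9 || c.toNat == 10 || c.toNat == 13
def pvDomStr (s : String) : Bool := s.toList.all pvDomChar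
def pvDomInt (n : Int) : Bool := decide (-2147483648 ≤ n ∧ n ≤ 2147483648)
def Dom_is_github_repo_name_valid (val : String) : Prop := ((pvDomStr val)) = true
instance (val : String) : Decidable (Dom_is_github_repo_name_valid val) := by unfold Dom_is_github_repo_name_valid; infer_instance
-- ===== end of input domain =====

-- B replaces A's explicit length guard and per-character membership loop with one anchored
-- regex fullmatch (character class + {0,100} quantifier); objective: idiomatic.

-- ===== PORT A =====
-- string.ascii_letters + string.digits + "-_."
def pvAllowedChars : String :=
  "abcdefghijklmnopqrstuvwxyzABCDEFGHIJKLMNOPQRSTUVWXYZ0123456789-_."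

-- the 'for char in val: if char not in allowed_chars: return False' loop (early return)
def pvCharLoopA : List Char → Bool
  | [] => true
  | c :: rest => if (pvAllowedChars.toList.contains c) then pvCharLoopA rest else false

def is_github_repo_name_valid (val : String) : Bool :=
  if val.toList.length > 100 then false
  else pvCharLoopA val.toList

-- ===== PORT B =====
-- the regex character class [A-Za-z0-9_.-], as a single-character test (exact: the class
-- matches exactly these ASCII ranges and literals)
def pvClassChar (c : Char) : Bool :=
  ('A' ≤ c && c ≤ 'Z') || ('a' ≤ c && c ≤ 'z') || ('0' ≤ c && c ≤ '9')
    || c == '_' || c == '.' || c == '-'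

-- fullmatch of [A-Za-z0-9_.-]{0,100}: every character matches the class and the whole
-- string (anchored) has at most 100 of them
def is_github_repo_name_valid_alt (val : String) : Bool :=
  decide (val.toList.length ≤ 100) && val.toList.all pvClassChar

-- ===== PRECONDITION & SPEC =====
def Spec_is_github_repo_name_valid (val : String) (out : Bool) : Prop := out = is_github_repo_name_valid_alt val
instance (val : String) (out : Bool) : Decidable (Spec_is_github_repo_name_valid val out) := by unfold Spec_is_github_repo_name_valid; infer_instance

-- ===== CLAIM (what is proved, stated in full; the proofs are below) =====
def Claim_equal_is_github_repo_name_valid : Prop := ∀ (val : String), Dom_is_github_repo_name_valid val → Spec_is_github_repo_name_valid val (is_github_repo_name_valid val)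

-- ===== LEMMAS AND PROOFS =====

-- membership in A's allowed-characters string agrees with B's regex class on all ASCII
set_option maxRecDepth 4096 in
theorem pv_allowed_eq_class_ofNat : ∀ n : Nat, n < 128 →
    decide (Char.ofNat n ∈ pvAllowedChars.toList) = pvClassChar (Char.ofNat n) := by decide

theorem pv_allowed_eq_class (c : Char) (h : pvDomChar c = true) :
    decide (c ∈ pvAllowedChars.toList) = pvClassChar c := by
  have hlt : c.toNat < 128 := by
    simp only [pvDomChar, Bool.or_eq_true, Bool.and_eq_true, decide_eq_true_eq,
      beq_iff_eq] at h
    omega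
  have := pv_allowed_eq_class_ofNat c.toNat hlt
  rwa [Char.ofNat_toNat] at this

-- A's early-return loop computes List.all of the class test on Dom strings
theorem pv_loop_eq_all (l : List Char) (h : ∀ c ∈ l, pvDomChar c = true) :
    pvCharLoopA l = l.all pvClassChar := by
  induction l with
  | nil => rfl
  | cons c rest ih =>
    have hc := pv_allowed_eq_class c (h c (List.mem_cons_self ..))
    by_cases hm : c ∈ pvAllowedChars.toList
    · simp [pvCharLoopA, hm, ← hc, ih fun d hd => h d (List.mem_cons_of_mem _ hd)]
    · simp [pvCharLoopA, hm, List.all_cons, ← hc]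

-- ===== VERDICT (by name: the statement is the Claim_ definition above) =====
theorem is_github_repo_name_valid_spec : Claim_equal_is_github_repo_name_valid := by
  intro val hdom
  unfold Spec_is_github_repo_name_valid is_github_repo_name_valid is_github_repo_name_valid_alt
  have hall : ∀ c ∈ val.toList, pvDomChar c = true := by
    simpa [Dom_is_github_repo_name_valid, pvDomStr, List.all_eq_true] using hdom
  rw [pv_loop_eq_all val.toList hall]
  by_cases hlen : 100 < val.toList.length
  · rw [if_pos hlen, (by simpa using hlen : decide (val.toList.length ≤ 100) = false),
      Bool.false_and]
  · rw [if_neg hlen, (by simpa using Nat.le_of_not_lt hlen :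
      decide (val.toList.length ≤ 100) = true), Bool.true_and]
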